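-- pv_equiv track=rewrite | github.com/ZackaryW/gh-for-zush | src/gh_for_zush/pkgconfirm.py | _confirm_prefixless_match
-- ===== SOURCE A (Python) =====
-- def normalize_package_name(name: str) -> str:
--     """Normalize one package or distribution name for resolution checks."""
--     normalized = name.strip().lower()
--     return normalized.replace("_", "-").replace(".", "-")
--
-- def _confirm_prefixless_match(
--     package: str,
--     installed_packages: set[str],
--     repository_prefixes: tuple[str, ...],
-- ) -> bool:
--     """Confirm resolution by normalized distribution name or prefix-stripped fallback names."""
--     normalized_installed_packages = _normalize_installed_packages(installed_packages)
--     for candidate in _candidate_package_names(package, repository_prefixes):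
--         if candidate in normalized_installed_packages:
--             return True
--     return False
--
-- def _normalize_installed_packages(installed_packages: set[str]) -> set[str]:
--     """Normalize one installed-package snapshot for lookup checks."""
--     return {normalize_package_name(package) for package in installed_packages if package.strip()}
--
-- def _candidate_package_names(package: str, repository_prefixes: tuple[str, ...]) -> tuple[str, ...]:
--     """Build the normalized package names that the built-in lookup methods may accept."""
--     normalized_package = normalize_package_name(package)
--     if not normalized_package:
--         return ()
--     candidates = [normalized_package]
--     for prefix in repository_prefixes:
--         normalized_prefix = prefix.strip().lower()
--         if normalized_prefix and package.startswith(prefix):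
--             stripped_candidate = normalize_package_name(package[len(prefix):])
--             if stripped_candidate and stripped_candidate not in candidates:
--                 candidates.append(stripped_candidate)
--     return tuple(candidates)
-- ===== SOURCE B (Python) =====
-- def normalize_package_name(name: str) -> str:
--     normalized = name.strip().lower()
--     return normalized.replace("_", "-").replace(".", "-")
--
-- def _candidate_package_names(package, repository_prefixes):
--     normalized_package = normalize_package_name(package)
--     if not normalized_package:
--         return ()
--     candidates = [normalized_package]
--     for prefix in repository_prefixes:
--         normalized_prefix = prefix.strip().lower()
--         if normalized_prefix and package.startswith(prefix):
--             stripped_candidate = normalize_package_name(package[len(prefix):])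
--             if stripped_candidate and stripped_candidate not in candidates:
--                 candidates.append(stripped_candidate)
--     return tuple(candidates)
--
-- def _confirm_prefixless_match(package, installed_packages, repository_prefixes):
--     # Sort-and-merge intersection test: sort both deduplicated sides and walk them
--     # with two pointers; True iff the sorted sequences share an element.
--     cands = sorted(set(_candidate_package_names(package, repository_prefixes)))
--     installed = sorted({normalize_package_name(p) for p in installed_packages if p.strip()})
--     i = j = 0
--     while i < len(cands) and j < len(installed):
--         if cands[i] == installed[j]:
--             return True
--         if cands[i] < installed[j]:
--             i += 1
--         else:
--             j += 1
--     return False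
-- ===== Notes on version B (the rewrite author's own statement) =====
-- stated objective: alternative
-- what changed: B replaces A's hash-set membership scan (normalize all installed names into a set, probe each candidate) by a sort-and-merge intersection test: both deduplicated sides are sorted and walked with two pointers, returning True iff the ordered sequences share an element.
import Mathlib
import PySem

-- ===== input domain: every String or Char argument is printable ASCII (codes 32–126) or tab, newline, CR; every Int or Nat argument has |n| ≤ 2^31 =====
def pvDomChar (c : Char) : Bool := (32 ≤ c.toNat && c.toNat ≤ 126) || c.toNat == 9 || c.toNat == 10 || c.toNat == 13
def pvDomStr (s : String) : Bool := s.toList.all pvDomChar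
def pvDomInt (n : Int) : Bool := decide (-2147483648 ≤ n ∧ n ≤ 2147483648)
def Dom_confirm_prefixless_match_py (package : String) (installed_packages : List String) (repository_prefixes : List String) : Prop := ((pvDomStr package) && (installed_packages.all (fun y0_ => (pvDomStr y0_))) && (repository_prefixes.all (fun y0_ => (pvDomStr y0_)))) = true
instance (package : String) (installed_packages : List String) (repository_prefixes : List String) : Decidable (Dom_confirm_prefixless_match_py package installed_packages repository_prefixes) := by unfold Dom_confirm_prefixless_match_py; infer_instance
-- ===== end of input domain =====

-- B's change: A probes each candidate against a hash set of the normalized installed names;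
-- B instead sorts both deduplicated sides and walks them with a two-pointer merge,
-- answering whether the ordered sequences share an element (alternative algorithm).

-- shared helper: normalize_package_name (identical source in A and B)
def pyNormalize (name : String) : String :=
  PySem.Str.replace (PySem.Str.replace (PySem.Str.lower (PySem.Str.strip name)) "_" "-") "." "-"

-- shared helper: _candidate_package_names (identical source in A and B)
def pyCandidates (package : String) (repository_prefixes : List String) : List String :=
  let normalized_package := pyNormalize package
  if normalized_package = "" then []
  else
    repository_prefixes.foldl (fun candidates prefix_ =>
      let normalized_prefix := PySem.Str.lower (PySem.Str.strip prefix_)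
      if normalized_prefix ≠ "" ∧ PySem.Str.startswith package prefix_ = true then
        let stripped_candidate :=
          pyNormalize (PySem.Str.slice package (some (PySem.Str.len prefix_ : Int)) none)
        if stripped_candidate ≠ "" ∧ stripped_candidate ∉ candidates then
          candidates ++ [stripped_candidate]
        else candidates
      else candidates) [normalized_package]

-- ===== PORT A =====
def confirm_prefixless_match_py (package : String) (installed_packages : List String) (repository_prefixes : List String) : Bool :=
  -- _normalize_installed_packages: set comprehension over the installed snapshot
  let normalized_installed : PySem.Set String :=
    PySem.Set.ofList ((installed_packages.filter (fun p => PySem.Str.strip p != "")).map pyNormalize)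
  -- for candidate in _candidate_package_names(...): if candidate in ...: return True
  (pyCandidates package repository_prefixes).any (fun c => PySem.Set.contains normalized_installed c)

-- ===== PORT B =====
-- the two-pointer while loop of Source B, as recursion on the two sorted lists
def mergeCommon : List String → List String → Bool
  | [], _ => false
  | _ :: _, [] => false
  | a :: as, b :: bs =>
    if a = b then true
    else if a < b then mergeCommon as (b :: bs)
    else mergeCommon (a :: as) bs
termination_by xs ys => xs.length + ys.length

def confirm_prefixless_match_py_alt (package : String) (installed_packages : List String) (repository_prefixes : List String) : Bool :=
  let cands := PySem.List.sorted (PySem.Set.ofList (pyCandidates package repository_prefixes)) (fun x => x) false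
  let installed := PySem.List.sorted
    (PySem.Set.ofList ((installed_packages.filter (fun p => PySem.Str.strip p != "")).map pyNormalize))
    (fun x => x) false
  mergeCommon cands installed

-- ===== PRECONDITION & SPEC =====
def Spec_confirm_prefixless_match_py (package : String) (installed_packages : List String) (repository_prefixes : List String) (out : Bool) : Prop := out = confirm_prefixless_match_py_alt package installed_packages repository_prefixes
instance (package : String) (installed_packages : List String) (repository_prefixes : List String) (out : Bool) : Decidable (Spec_confirm_prefixless_match_py package installed_packages repository_prefixes out) := by unfold Spec_confirm_prefixless_match_py; infer_instance

-- ===== CLAIM (what is proved, stated in full; the proofs are below) =====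
def Claim_equal_confirm_prefixless_match_py : Prop := ∀ (package : String) (installed_packages : List String) (repository_prefixes : List String), Dom_confirm_prefixless_match_py package installed_packages repository_prefixes → Spec_confirm_prefixless_match_py package installed_packages repository_prefixes (confirm_prefixless_match_py package installed_packages repository_prefixes)

-- ===== LEMMAS AND PROOFS =====

-- on strictly increasing lists the two-pointer merge decides exactly "the lists share an element"
theorem mergeCommon_iff (xs ys : List String)
    (hx : xs.Pairwise (· < ·)) (hy : ys.Pairwise (· < ·)) :
    mergeCommon xs ys = true ↔ ∃ x, x ∈ xs ∧ x ∈ ys := by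
  fun_induction mergeCommon xs ys
  case case1 => simp
  case case2 => simp
  case case3 a as bs => simp
  case case4 a as b bs hne hlt ih =>
    rw [ih (List.pairwise_cons.mp hx).2 hy]
    constructor
    · rintro ⟨x, hx1, hx2⟩; exact ⟨x, List.mem_cons_of_mem a hx1, hx2⟩
    · rintro ⟨x, hx1, hx2⟩
      refine ⟨x, ?_, hx2⟩
      rcases List.mem_cons.mp hx1 with rfl | h
      · exfalso
        rcases List.mem_cons.mp hx2 with rfl | h2
        · exact hne rfl
        · exact absurd (lt_trans hlt ((List.pairwise_cons.mp hy).1 x h2)) (lt_irrefl x)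
      · exact h
  case case5 a as b bs hne hlt ih =>
    have hba : b < a := lt_of_le_of_ne (not_lt.mp hlt) (fun h => hne h.symm)
    rw [ih hx (List.pairwise_cons.mp hy).2]
    constructor
    · rintro ⟨x, hx1, hx2⟩; exact ⟨x, hx1, List.mem_cons_of_mem b hx2⟩
    · rintro ⟨x, hx1, hx2⟩
      refine ⟨x, hx1, ?_⟩
      rcases List.mem_cons.mp hx2 with rfl | h
      · exfalso
        rcases List.mem_cons.mp hx1 with rfl | h1
        · exact hne rfl
        · exact absurd (lt_trans hba ((List.pairwise_cons.mp hx).1 x h1)) (lt_irrefl x)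
      · exact h

-- Both sides decide the same proposition: some candidate is among the normalized installed names.
theorem confirm_eq (package : String) (installed_packages : List String) (repository_prefixes : List String) :
    confirm_prefixless_match_py package installed_packages repository_prefixes
      = confirm_prefixless_match_py_alt package installed_packages repository_prefixes := by
  unfold confirm_prefixless_match_py confirm_prefixless_match_py_alt
  rw [Bool.eq_iff_iff]
  rw [mergeCommon_iff _ _ (PySem.List.sorted_ofList_pairwise_lt _) (PySem.List.sorted_ofList_pairwise_lt _)]
  simp [List.any_eq_true, PySem.Set.mem_ofList, PySem.List.mem_sorted]

-- ===== VERDICT (by name: the statement is the Claim_ definition above) =====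
theorem confirm_prefixless_match_py_spec : Claim_equal_confirm_prefixless_match_py := by
  intro package installed prefixes _
  exact confirm_eq package installed prefixes
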